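-- pv_equiv track=rewrite | github.com/colliner/pyCBH | pycbh/lookup_utils.py | cbh_vec2uniq
-- ===== SOURCE A (Python) =====
-- def cbh_vec2uniq(cbh_vec):
--     """
--     Converts a dictionary of CBH vectors into a dictionary of unique fragments.
--
--     Parameters:
--     - cbh_vec (dict): Dictionary containing CBH vectors.
--
--     Returns:
--     - dict: Dictionary with unique fragments grouped by CBH rung.
--     """
--     uniq_dict = {'all': list()}
--     for key, value in cbh_vec.items():
--         cbh_rung = key.split(' ')[-1].replace(':', '')
--         if cbh_rung not in uniq_dict:
--             uniq_dict[cbh_rung] = list()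
--         for x in value:
--             if x not in uniq_dict[cbh_rung]:
--                 uniq_dict[cbh_rung].append(x)
--             if x not in uniq_dict['all']:
--                 uniq_dict['all'].append(x)
--     return uniq_dict
-- ===== SOURCE B (Python) =====
-- def cbh_vec2uniq(cbh_vec):
--     # Phase 1: concatenate every value list (duplicates kept) under its rung and under 'all'.
--     groups = {'all': []}
--     for key, value in cbh_vec.items():
--         rung = key.split(' ')[-1].replace(':', '')
--         groups.setdefault(rung, []).extend(value)
--         groups['all'].extend(value)
--     # Phase 2: deduplicate each accumulated list, keeping first occurrences.
--     return {k: list(dict.fromkeys(v)) for k, v in groups.items()}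
-- ===== Notes on version B (the rewrite author's own statement) =====
-- stated objective: faster
-- what changed: A deduplicates online with per-element membership scans of the growing per-rung and global lists; B first concatenates every value list (duplicates kept) into its rung bucket and the 'all' bucket via setdefault, then deduplicates each bucket once with list(dict.fromkeys(...)) keeping first occurrences.
import Mathlib
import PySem

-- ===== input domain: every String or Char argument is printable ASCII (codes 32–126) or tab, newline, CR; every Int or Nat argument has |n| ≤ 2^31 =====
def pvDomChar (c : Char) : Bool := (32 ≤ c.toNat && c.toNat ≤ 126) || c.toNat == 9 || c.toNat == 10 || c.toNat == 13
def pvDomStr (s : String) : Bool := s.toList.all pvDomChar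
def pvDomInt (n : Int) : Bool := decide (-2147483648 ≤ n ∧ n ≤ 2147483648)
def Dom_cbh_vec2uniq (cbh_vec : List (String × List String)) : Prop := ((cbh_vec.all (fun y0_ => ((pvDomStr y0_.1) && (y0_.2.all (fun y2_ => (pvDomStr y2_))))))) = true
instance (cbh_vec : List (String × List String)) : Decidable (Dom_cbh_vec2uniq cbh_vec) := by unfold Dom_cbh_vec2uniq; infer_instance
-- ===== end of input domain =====

-- B replaces A's per-element membership tests by a two-phase pass (concatenate per rung, then
-- dedup each list once, first occurrences kept): a different decomposition of the same task.

-- rung extraction shared by both Pythons: key.split(' ')[-1].replace(':', '')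
def pvRung (key : String) : String :=
  PySem.Str.replace (PySem.List.pyGetD ((PySem.Str.split? key " ").getD []) (-1) "") ":" ""

-- ===== PORT A =====
-- the body of A's inner loop: two conditional appends (membership tests on the current lists)
def pvStepA (rung : String) (d2 : PySem.Dict String (List String)) (x : String) :
    PySem.Dict String (List String) :=
  let d3 := if x ∈ d2.getD rung [] then d2 else d2.modify rung [] (· ++ [x])
  if x ∈ d3.getD "all" [] then d3 else d3.modify "all" [] (· ++ [x])

-- the body of A's outer loop over cbh_vec.items()
def pvItemA (d : PySem.Dict String (List String)) (kv : String × List String) :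
    PySem.Dict String (List String) :=
  let rung := pvRung kv.1
  let d1 := if d.contains rung then d else d.insert rung ([] : List String)
  kv.2.foldl (pvStepA rung) d1

def cbh_vec2uniq (cbh_vec : List (String × List String)) : List (String × List String) :=
  (cbh_vec.foldl pvItemA (PySem.Dict.ofList [("all", ([] : List String))])).items

-- ===== PORT B =====
-- the body of B's single accumulation loop: setdefault + two whole-list concatenations
def pvItemB (g : PySem.Dict String (List String)) (kv : String × List String) :
    PySem.Dict String (List String) :=
  let rung := pvRung kv.1
  ((g.setdefault rung ([] : List String)).modify rung [] (· ++ kv.2)).modify "all" [] (· ++ kv.2)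

def cbh_vec2uniq_alt (cbh_vec : List (String × List String)) : List (String × List String) :=
  ((cbh_vec.foldl pvItemB (PySem.Dict.ofList [("all", ([] : List String))])).items).map
    (fun p => (p.1, PySem.List.dedup p.2))

-- ===== PRECONDITION & SPEC =====
def Spec_cbh_vec2uniq (cbh_vec : List (String × List String)) (out : List (String × List String)) : Prop := out = cbh_vec2uniq_alt cbh_vec
instance (cbh_vec : List (String × List String)) (out : List (String × List String)) : Decidable (Spec_cbh_vec2uniq cbh_vec out) := by unfold Spec_cbh_vec2uniq; infer_instance

-- ===== CLAIM (what is proved, stated in full; the proofs are below) =====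
def Claim_equal_cbh_vec2uniq : Prop := ∀ (cbh_vec : List (String × List String)), Dom_cbh_vec2uniq cbh_vec → Spec_cbh_vec2uniq cbh_vec (cbh_vec2uniq cbh_vec)

-- ===== LEMMAS AND PROOFS =====

-- The loop invariant: same keys in the same order, A's value lists are the ordered dedups of B's.
def pvInv (dA dB : PySem.Dict String (List String)) : Prop :=
  dA.keys = dB.keys ∧ dA.keys.Nodup ∧ "all" ∈ dA.keys ∧
  ∀ k, dA.getD k [] = PySem.List.dedup (dB.getD k [])

theorem pv_update_dedup (b v : List String) :
    PySem.Set.update (PySem.List.dedup b) v = PySem.List.dedup (b ++ v) := by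
  simp [PySem.List.dedup_eq_ofList, PySem.Set.ofList_append]

theorem pv_update_absorb (t : PySem.Set String) (v : List String) (h : ∀ y ∈ v, y ∈ t) :
    PySem.Set.update t v = t := by
  rw [PySem.Set.update_eq_append_filter]
  have hnil : List.filter (fun y => !t.contains y) (PySem.Set.ofList v) = [] := by
    rw [List.filter_eq_nil_iff]
    intro y hy
    have hyv : y ∈ v := by
      rw [← PySem.List.dedup_eq_ofList] at hy
      exact (PySem.List.mem_dedup v y).mp hy
    simp [PySem.Set.contains_iff]
    exact h y hyv
  rw [hnil, List.append_nil]

theorem pv_dedup_append_self (b v : List String) :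
    PySem.List.dedup ((b ++ v) ++ v) = PySem.List.dedup (b ++ v) := by
  rw [PySem.List.dedup_eq_ofList, PySem.List.dedup_eq_ofList, PySem.Set.ofList_append (b ++ v) v]
  apply pv_update_absorb
  intro y hy
  rw [← PySem.List.dedup_eq_ofList, PySem.List.mem_dedup]
  exact List.mem_append_right _ hy

theorem pv_stepA_getD (rung x : String) (d : PySem.Dict String (List String)) (k : String) :
    (pvStepA rung d x).getD k [] =
      if k = "all" then PySem.Set.add (d.getD "all" []) x
      else if k = rung then PySem.Set.add (d.getD rung []) x
      else d.getD k [] := by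
  unfold pvStepA
  by_cases hr : rung = "all"
  · subst hr
    by_cases hx : x ∈ d.getD "all" []
    · by_cases hk : k = "all" <;> simp [hx, hk, PySem.Set.add_of_mem hx]
    · have hmem : x ∈ (d.modify "all" [] (· ++ [x])).getD "all" [] := by
        rw [PySem.Dict.getD_modify_self]; simp
      by_cases hk : k = "all"
      · simp [hx, hmem, hk, PySem.Dict.getD_modify_self, PySem.Set.add_of_not_mem hx]
      · simp [hx, hmem, hk, PySem.Dict.getD_modify_of_ne d [] _ hk]
  · have hra : ¬ (("all" : String) = rung) := fun h => hr h.symm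
    by_cases hx : x ∈ d.getD rung []
    · simp only [if_pos hx]
      by_cases hy : x ∈ d.getD "all" []
      · simp only [if_pos hy]
        by_cases hk : k = "all"
        · simp [hk, PySem.Set.add_of_mem hy]
        · by_cases hk2 : k = rung
          · simp [hk, hk2, hr, PySem.Set.add_of_mem hx]
          · simp [hk, hk2]
      · simp only [if_neg hy]
        by_cases hk : k = "all"
        · simp [hk, PySem.Dict.getD_modify_self, PySem.Set.add_of_not_mem hy]
        · by_cases hk2 : k = rung
          · simp [hk, hk2, hr, PySem.Dict.getD_modify_of_ne d [] _ hr,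
              PySem.Set.add_of_mem hx]
          · simp [hk, hk2, PySem.Dict.getD_modify_of_ne d [] _ hk]
    · simp only [if_neg hx]
      have hallEq : (d.modify rung [] (· ++ [x])).getD "all" [] = d.getD "all" [] :=
        PySem.Dict.getD_modify_of_ne d [] _ hra
      rw [hallEq]
      by_cases hy : x ∈ d.getD "all" []
      · simp only [if_pos hy]
        by_cases hk : k = "all"
        · simp [hk, hallEq, PySem.Set.add_of_mem hy]
        · by_cases hk2 : k = rung
          · simp [hk, hk2, hr, PySem.Dict.getD_modify_self, PySem.Set.add_of_not_mem hx]
          · simp [hk, hk2, PySem.Dict.getD_modify_of_ne d [] _ hk2]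
      · simp only [if_neg hy]
        by_cases hk : k = "all"
        · simp [hk, PySem.Dict.getD_modify_self, hallEq, PySem.Set.add_of_not_mem hy]
        · by_cases hk2 : k = rung
          · simp [hk, hk2, hr, PySem.Dict.getD_modify_of_ne _ [] _ hr,
              PySem.Dict.getD_modify_self, PySem.Set.add_of_not_mem hx]
          · simp [hk, hk2, PySem.Dict.getD_modify_of_ne d [] _ hk2,
              PySem.Dict.getD_modify_of_ne _ [] _ hk]

theorem pv_stepA_keys (rung x : String) (d : PySem.Dict String (List String))
    (hrung : rung ∈ d.keys) (hall : "all" ∈ d.keys) :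
    (pvStepA rung d x).keys = d.keys := by
  unfold pvStepA
  have hkm : ∀ (c : String) (f : List String → List String), c ∈ d.keys →
      (d.modify c [] f).keys = d.keys := by
    intro c f hc
    rw [PySem.Dict.keys_modify,
      PySem.Dict.keys_insert_of_contains _ _ ((PySem.Dict.contains_iff_mem_keys d c).mpr hc)]
  by_cases hx : x ∈ d.getD rung []
  · simp only [if_pos hx]
    by_cases hy : x ∈ d.getD "all" []
    · simp [hy]
    · simp only [if_neg hy]; exact hkm _ _ hall
  · simp only [if_neg hx]
    have h1 : (d.modify rung [] (· ++ [x])).keys = d.keys := hkm _ _ hrung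
    by_cases hy : x ∈ (d.modify rung [] (· ++ [x])).getD "all" []
    · simp only [if_pos hy]; exact h1
    · simp only [if_neg hy]
      rw [PySem.Dict.keys_modify,
        PySem.Dict.keys_insert_of_contains _ _
          ((PySem.Dict.contains_iff_mem_keys _ "all").mpr (h1 ▸ hall)), h1]

theorem pv_innerA (rung : String) (v : List String) :
    ∀ d : PySem.Dict String (List String), rung ∈ d.keys → "all" ∈ d.keys →
      (v.foldl (pvStepA rung) d).keys = d.keys ∧
      ∀ k, (v.foldl (pvStepA rung) d).getD k [] =
        if k = "all" then PySem.Set.update (d.getD "all" []) v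
        else if k = rung then PySem.Set.update (d.getD rung []) v
        else d.getD k [] := by
  induction v with
  | nil =>
      intro d _ _
      refine ⟨rfl, fun k => ?_⟩
      by_cases hk : k = "all"
      · simp [hk, PySem.Set.update_nil]
      · by_cases hk2 : k = rung
        · by_cases hra : rung = "all" <;> simp [hk, hk2, hra, PySem.Set.update_nil]
        · simp [hk, hk2]
  | cons x v ih =>
      intro d hrung hall
      have hkeys : (pvStepA rung d x).keys = d.keys := pv_stepA_keys rung x d hrung hall
      obtain ⟨ihk, ihv⟩ := ih (pvStepA rung d x) (hkeys ▸ hrung) (hkeys ▸ hall)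
      refine ⟨by rw [List.foldl_cons, ihk, hkeys], fun k => ?_⟩
      rw [List.foldl_cons, ihv k, pv_stepA_getD, pv_stepA_getD, pv_stepA_getD]
      by_cases hk : k = "all"
      · simp [hk, PySem.Set.update_cons]
      · by_cases hk2 : k = rung
        · by_cases hra : rung = "all" <;> simp [hk, hk2, hra, PySem.Set.update_cons]
        · simp [hk, hk2]

theorem pv_item_core (rung : String) (v : List String)
    (d g : PySem.Dict String (List String))
    (hkeys : d.keys = g.keys) (hnd : d.keys.Nodup) (hall : "all" ∈ d.keys)
    (hval : ∀ k, d.getD k [] = PySem.List.dedup (g.getD k [])) (hrung : rung ∈ d.keys) :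
    pvInv (v.foldl (pvStepA rung) d)
      ((g.modify rung [] (· ++ v)).modify "all" [] (· ++ v)) := by
  obtain ⟨hAk, hAv⟩ := pv_innerA rung v d hrung hall
  have hrg : rung ∈ g.keys := hkeys ▸ hrung
  have hag : "all" ∈ g.keys := hkeys ▸ hall
  have hk2 : (g.modify rung [] (· ++ v)).keys = g.keys := by
    rw [PySem.Dict.keys_modify,
      PySem.Dict.keys_insert_of_contains _ _ ((PySem.Dict.contains_iff_mem_keys g rung).mpr hrg)]
  have hk3 : ((g.modify rung [] (· ++ v)).modify "all" [] (· ++ v)).keys = g.keys := by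
    rw [PySem.Dict.keys_modify,
      PySem.Dict.keys_insert_of_contains _ _
        ((PySem.Dict.contains_iff_mem_keys _ "all").mpr (hk2 ▸ hag)), hk2]
  refine ⟨by rw [hAk, hk3, hkeys], by rw [hAk]; exact hnd, by rw [hAk]; exact hall, fun k => ?_⟩
  rw [hAv k, PySem.Dict.getD_modify, PySem.Dict.getD_modify, PySem.Dict.getD_modify]
  by_cases hka : k = "all"
  · subst hka
    by_cases hra : ("all" : String) = rung
    · subst hra
      simp only [if_pos rfl, hval "all", pv_update_dedup]
      exact (pv_dedup_append_self _ _).symm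
    · simp [if_neg hra, hval "all", PySem.Set.ofList_append]
  · by_cases hkr : k = rung
    · subst hkr
      simp [if_neg hka, hval k, PySem.Set.ofList_append]
    · simp only [if_neg hka, if_neg hkr, hval k]

theorem pv_item (kv : String × List String) (d g : PySem.Dict String (List String))
    (h : pvInv d g) : pvInv (pvItemA d kv) (pvItemB g kv) := by
  obtain ⟨hkeys, hnd, hall, hval⟩ := h
  simp only [pvItemA, pvItemB]
  have hcon : d.contains (pvRung kv.1) = g.contains (pvRung kv.1) := by
    rw [PySem.Dict.contains_eq_decide_mem_keys, PySem.Dict.contains_eq_decide_mem_keys, hkeys]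
  by_cases hc : pvRung kv.1 ∈ d.keys
  · have hcd : d.contains (pvRung kv.1) = true :=
      (PySem.Dict.contains_iff_mem_keys d _).mpr hc
    rw [if_pos hcd, PySem.Dict.setdefault_of_contains g [] (hcon ▸ hcd)]
    exact pv_item_core _ kv.2 d g hkeys hnd hall hval hc
  · have hcd : d.contains (pvRung kv.1) = false := by
      rw [PySem.Dict.contains_eq_decide_mem_keys]; simp [hc]
    rw [if_neg (by simp [hcd]), PySem.Dict.setdefault_of_not_contains g [] (hcon ▸ hcd)]
    have hkeys1 : (d.insert (pvRung kv.1) ([] : List String)).keys = d.keys ++ [pvRung kv.1] :=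
      PySem.Dict.keys_insert_of_not_contains d [] hcd
    have hkeys1g : (g.insert (pvRung kv.1) ([] : List String)).keys = g.keys ++ [pvRung kv.1] :=
      PySem.Dict.keys_insert_of_not_contains g [] (hcon ▸ hcd)
    refine pv_item_core _ kv.2 _ _ ?_ ?_ ?_ ?_ ?_
    · rw [hkeys1, hkeys1g, hkeys]
    · rw [hkeys1]
      refine List.Nodup.append hnd (List.nodup_singleton _) ?_
      intro a ha hb
      rw [List.mem_singleton] at hb
      subst hb
      exact hc ha
    · rw [hkeys1]; exact List.mem_append_left _ hall
    · intro k
      rw [PySem.Dict.getD_insert, PySem.Dict.getD_insert]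
      by_cases hk : k = pvRung kv.1
      · simp [hk, PySem.List.dedup_eq_ofList, PySem.Set.ofList_nil]
      · simp [hk, hval k]
    · rw [hkeys1]; exact List.mem_append_right _ (List.mem_singleton_self _)

theorem pv_fold (l : List (String × List String)) :
    ∀ d g, pvInv d g → pvInv (l.foldl pvItemA d) (l.foldl pvItemB g) := by
  induction l with
  | nil => intro d g h; exact h
  | cons kv l ih =>
      intro d g h
      rw [List.foldl_cons, List.foldl_cons]
      exact ih _ _ (pv_item kv d g h)

theorem pv_init :
    pvInv (PySem.Dict.ofList [("all", ([] : List String))])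
          (PySem.Dict.ofList [("all", ([] : List String))]) := by
  have he : PySem.Dict.ofList [("all", ([] : List String))]
      = PySem.Dict.empty.insert "all" [] := rfl
  refine ⟨rfl, ?_, ?_, ?_⟩
  · rw [he, PySem.Dict.keys_insert_of_not_contains _ _ (PySem.Dict.contains_empty _)]
    exact List.nodup_singleton _
  · rw [he, PySem.Dict.keys_insert_of_not_contains _ _ (PySem.Dict.contains_empty _)]
    exact List.mem_singleton_self _
  · intro k
    rw [he, PySem.Dict.getD_insert]
    by_cases hk : k = "all"
    · simp [hk, PySem.List.dedup_eq_ofList, PySem.Set.ofList_nil]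
    · simp [hk, PySem.Dict.getD_empty, PySem.List.dedup_eq_ofList, PySem.Set.ofList_nil]

-- ===== VERDICT (by name: the statement is the Claim_ definition above) =====
theorem cbh_vec2uniq_spec : Claim_equal_cbh_vec2uniq := by
  intro cbh_vec _
  unfold Spec_cbh_vec2uniq cbh_vec2uniq cbh_vec2uniq_alt
  obtain ⟨hkeys, hnd, -, hval⟩ := pv_fold cbh_vec _ _ pv_init
  rw [PySem.Dict.items_eq_map_keys _ hnd ([] : List String),
    PySem.Dict.items_eq_map_keys _ (hkeys ▸ hnd) ([] : List String), List.map_map, hkeys]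
  apply List.map_congr_left
  intro k _
  simp only [Function.comp]
  rw [hval k]
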